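-- pv_equiv track=rewrite | github.com/martijndhondt/et-adv-stats | log_parser.py | find_session_start
-- ===== SOURCE A (Python) =====
-- def find_session_start(all_lines, before_idx):
--     last_init = None
--     for i, line in enumerate(all_lines[:before_idx + 1]):
--         if " InitGame:" in line:
--             last_init = i
--         elif " ShutdownGame:" in line:
--             last_init = None
--     return last_init
-- ===== SOURCE B (Python) =====
-- def find_session_start(all_lines, before_idx):
--     sub = all_lines[:before_idx + 1]
--     # locate the last effective ShutdownGame line (one that is not also an InitGame line)
--     s = -1
--     for i in range(len(sub) - 1, -1, -1):
--         if " ShutdownGame:" in sub[i] and " InitGame:" not in sub[i]: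
--             s = i
--             break
--     # the answer is the last InitGame line strictly after it
--     for i in range(len(sub) - 1, s, -1):
--         if " InitGame:" in sub[i]:
--             return i
--     return None
-- ===== Notes on version B (the rewrite author's own statement) =====
-- stated objective: alternative
-- what changed: Replaces A's single forward stateful fold (tracking and resetting last_init) with two backward scans with early exit: first locate the last effective ShutdownGame line, then return the last InitGame line strictly after it.
import Mathlib
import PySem

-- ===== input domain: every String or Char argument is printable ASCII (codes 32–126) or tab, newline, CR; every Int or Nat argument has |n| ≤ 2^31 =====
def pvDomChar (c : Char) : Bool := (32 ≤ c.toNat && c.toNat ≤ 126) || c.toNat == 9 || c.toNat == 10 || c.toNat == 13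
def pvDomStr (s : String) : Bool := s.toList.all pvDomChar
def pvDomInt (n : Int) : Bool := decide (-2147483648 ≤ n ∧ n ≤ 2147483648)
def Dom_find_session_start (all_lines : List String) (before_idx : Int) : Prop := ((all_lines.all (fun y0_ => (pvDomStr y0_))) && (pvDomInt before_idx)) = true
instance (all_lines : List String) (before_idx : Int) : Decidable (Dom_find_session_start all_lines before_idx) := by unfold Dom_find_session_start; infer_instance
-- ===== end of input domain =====

-- B replaces A's forward stateful fold by two backward early-exit scans (same cost); return value only, no side effects.

-- ===== PORT A =====
def find_session_start (all_lines : List String) (before_idx : Int) : Option Int :=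
  (PySem.List.enumerate (PySem.List.slice all_lines none (some (before_idx + 1))) 0).foldl
    (fun last_init p =>
      if PySem.Str.isIn " InitGame:" p.2 then some p.1
      else if PySem.Str.isIn " ShutdownGame:" p.2 then none
      else last_init) none

-- ===== PORT B =====
-- first loop of Source B: scan the index range, return the first match (break), else -1
def fssShutScan (sub : List String) : List Int → Int
  | [] => -1
  | i :: rest =>
    if PySem.Str.isIn " ShutdownGame:" (PySem.List.pyGetD sub i "") &&
       !(PySem.Str.isIn " InitGame:" (PySem.List.pyGetD sub i "")) then i
    else fssShutScan sub rest

-- second loop of Source B: first index in the range whose line contains " InitGame:" (early return)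
def fssInitScan (sub : List String) : List Int → Option Int
  | [] => none
  | i :: rest =>
    if PySem.Str.isIn " InitGame:" (PySem.List.pyGetD sub i "") then some i
    else fssInitScan sub rest

def find_session_start_alt (all_lines : List String) (before_idx : Int) : Option Int :=
  let sub := PySem.List.slice all_lines none (some (before_idx + 1))
  let s := fssShutScan sub (PySem.List.pyRange ((sub.length : Int) - 1) (-1) (-1))
  fssInitScan sub (PySem.List.pyRange ((sub.length : Int) - 1) s (-1))

-- ===== PRECONDITION & SPEC =====
def Spec_find_session_start (all_lines : List String) (before_idx : Int) (out : Option Int) : Prop := out = find_session_start_alt all_lines before_idx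
instance (all_lines : List String) (before_idx : Int) (out : Option Int) : Decidable (Spec_find_session_start all_lines before_idx out) := by unfold Spec_find_session_start; infer_instance

-- ===== CLAIM (what is proved, stated in full; the proofs are below) =====
def Claim_equal_find_session_start : Prop := ∀ (all_lines : List String) (before_idx : Int), Dom_find_session_start all_lines before_idx → Spec_find_session_start all_lines before_idx (find_session_start all_lines before_idx)

-- ===== LEMMAS AND PROOFS =====

theorem pyGetD_append_lt (xs : List String) (x : String) (i : Int) (h0 : 0 ≤ i)
    (h1 : i < (xs.length : Int)) :
    PySem.List.pyGetD (xs ++ [x]) i "" = PySem.List.pyGetD xs i "" := by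
  rw [PySem.List.pyGetD_eq_getElem (xs ++ [x]) "" h0 (by simp; omega),
      PySem.List.pyGetD_eq_getElem xs "" h0 h1]
  rw [List.getElem_append_left]

theorem pyGetD_append_len (xs : List String) (x : String) :
    PySem.List.pyGetD (xs ++ [x]) (xs.length : Int) "" = x := by
  rw [PySem.List.pyGetD_eq_getElem (xs ++ [x]) "" (by positivity) (by simp)]
  simp

theorem shutScan_bound (sub : List String) (l : List Int) :
    fssShutScan sub l = -1 ∨ fssShutScan sub l ∈ l := by
  induction l with
  | nil => left; rfl
  | cons i rest ih =>
    simp only [fssShutScan]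
    split
    · right; exact List.mem_cons_self
    · rcases ih with h | h
      · left; exact h
      · right; exact List.mem_cons_of_mem _ h

theorem shutScan_append (xs : List String) (x : String) (l : List Int)
    (h : ∀ i ∈ l, 0 ≤ i ∧ i < (xs.length : Int)) :
    fssShutScan (xs ++ [x]) l = fssShutScan xs l := by
  induction l with
  | nil => rfl
  | cons i rest ih =>
    have hi := h i List.mem_cons_self
    simp only [fssShutScan, pyGetD_append_lt xs x i hi.1 hi.2]
    rw [ih (fun j hj => h j (List.mem_cons_of_mem _ hj))]

theorem initScan_append (xs : List String) (x : String) (l : List Int)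
    (h : ∀ i ∈ l, 0 ≤ i ∧ i < (xs.length : Int)) :
    fssInitScan (xs ++ [x]) l = fssInitScan xs l := by
  induction l with
  | nil => rfl
  | cons i rest ih =>
    have hi := h i List.mem_cons_self
    simp only [fssInitScan, pyGetD_append_lt xs x i hi.1 hi.2]
    rw [ih (fun j hj => h j (List.mem_cons_of_mem _ hj))]

theorem fss_main (sub : List String) :
    (PySem.List.enumerate sub 0).foldl
      (fun last_init p =>
        if PySem.Str.isIn " InitGame:" p.2 then some p.1
        else if PySem.Str.isIn " ShutdownGame:" p.2 then none
        else last_init) none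
    = fssInitScan sub (PySem.List.pyRange ((sub.length : Int) - 1)
        (fssShutScan sub (PySem.List.pyRange ((sub.length : Int) - 1) (-1) (-1))) (-1)) := by
  induction sub using List.reverseRecOn with
  | nil => rfl
  | append_singleton xs x ih =>
    have hlen : ((xs ++ [x]).length : Int) - 1 = (xs.length : Int) := by simp
    have hRmem : ∀ i ∈ PySem.List.pyRange ((xs.length : Int) - 1) (-1) (-1),
        0 ≤ i ∧ i < (xs.length : Int) := by
      intro i hi
      rw [PySem.List.mem_pyRange_neg_one] at hi
      omega
    have hsb : -1 ≤ fssShutScan xs (PySem.List.pyRange ((xs.length : Int) - 1) (-1) (-1))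
        ∧ fssShutScan xs (PySem.List.pyRange ((xs.length : Int) - 1) (-1) (-1))
          < (xs.length : Int) := by
      rcases shutScan_bound xs (PySem.List.pyRange ((xs.length : Int) - 1) (-1) (-1))
        with h | h
      · constructor <;> omega
      · have := PySem.List.mem_pyRange_neg_one.mp h; constructor <;> omega
    -- left side: peel off the last element of the fold
    rw [PySem.List.enumerate_append, List.foldl_append]
    simp only [PySem.List.enumerate_cons, PySem.List.enumerate_nil, List.foldl_cons,
      List.foldl_nil, zero_add]
    -- right side: peel off the first index of both backward scans
    rw [hlen, PySem.List.pyRange_neg_one_cons (by omega : (-1 : Int) < (xs.length : Int))]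
    simp only [fssShutScan, pyGetD_append_len]
    by_cases hI : PySem.Str.isIn " InitGame:" x = true
    · -- the new line is an InitGame line: both sides return its index
      have hc : (PySem.Str.isIn " ShutdownGame:" x && !PySem.Str.isIn " InitGame:" x)
          = false := by rw [hI]; simp
      rw [if_pos hI, hc, if_neg Bool.false_ne_true, shutScan_append xs x _ hRmem,
        PySem.List.pyRange_neg_one_cons hsb.2]
      simp only [fssInitScan, pyGetD_append_len]
      rw [if_pos hI]
    · have hIf : PySem.Str.isIn " InitGame:" x = false := by simpa using hI
      rw [if_neg hI]
      by_cases hS : PySem.Str.isIn " ShutdownGame:" x = true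
      · -- an effective ShutdownGame line: A resets, B's shutdown scan stops here
        have hc : (PySem.Str.isIn " ShutdownGame:" x && !PySem.Str.isIn " InitGame:" x)
            = true := by rw [hS, hIf]; rfl
        rw [if_pos hS, hc, if_pos rfl,
          PySem.List.pyRange_neg_one_eq_nil (le_refl ((xs.length : Int)))]
        rfl
      · -- a neutral line: both sides reduce to their value on xs
        have hc : (PySem.Str.isIn " ShutdownGame:" x && !PySem.Str.isIn " InitGame:" x)
            = false := by rw [Bool.eq_false_iff.mpr hS]; rfl
        rw [if_neg hS, hc, if_neg Bool.false_ne_true, shutScan_append xs x _ hRmem,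
          PySem.List.pyRange_neg_one_cons hsb.2]
        simp only [fssInitScan, pyGetD_append_len]
        rw [if_neg hI, initScan_append xs x _ (by
          intro i hi
          have := PySem.List.mem_pyRange_neg_one.mp hi
          omega)]
        exact ih

-- ===== VERDICT (by name: the statement is the Claim_ definition above) =====
theorem find_session_start_spec : Claim_equal_find_session_start := by
  intro all_lines before_idx _
  unfold Spec_find_session_start find_session_start find_session_start_alt
  exact fss_main _
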